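-- pv_equiv track=rewrite | github.com/derekbatoyon/adventofcode2020 | day18/part2.py | get_matching_parentheses
-- ===== SOURCE A (Python) =====
-- def get_matching_parentheses(line):
--     left, right = None, None
--     for i in range(len(line)):
--         if line[i] == '(':
--             left = i
--         elif line[i] == ')':
--             right = i
--             break
--     return left, right
-- ===== SOURCE B (Python) =====
-- def get_matching_parentheses(line):
--     right = line.find(')')
--     if right == -1:
--         left = line.rfind('(')
--         right = None
--     else:
--         left = line.rfind('(', 0, right)
--     return (None if left == -1 else left, right)
-- ===== Notes on version B (the rewrite author's own statement) =====
-- stated objective: idiomatic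
-- what changed: Replaces the char-by-char accumulating scan (tracking the last left parenthesis seen and breaking at the first right one) with two library scans: str.find for the first ')' and a bounded str.rfind for the nearest preceding '(', mapping -1 sentinels to None.
import Mathlib
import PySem

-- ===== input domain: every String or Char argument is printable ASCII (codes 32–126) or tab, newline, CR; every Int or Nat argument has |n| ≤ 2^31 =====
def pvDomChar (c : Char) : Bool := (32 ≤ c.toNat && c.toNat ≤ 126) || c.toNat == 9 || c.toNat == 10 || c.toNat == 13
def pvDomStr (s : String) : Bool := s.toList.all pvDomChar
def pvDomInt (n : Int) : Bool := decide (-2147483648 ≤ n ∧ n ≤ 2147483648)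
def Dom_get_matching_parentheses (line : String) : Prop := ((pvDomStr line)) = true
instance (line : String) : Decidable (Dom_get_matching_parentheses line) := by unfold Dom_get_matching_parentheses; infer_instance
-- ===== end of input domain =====

-- B replaces A's accumulating left-to-right scan by str.find for the first ')' and a bounded str.rfind for the nearest preceding '(' (idiomatic; return value only, no side effects).

-- ===== PORT A =====
-- the for-loop of A: index i, accumulator `left`; breaks at the first ')'
def getMPAux : List Char → Nat → Option Int → Option Int × Option Int
  | [], _, left => (left, none)
  | c :: rest, i, left =>
    if c = '(' then getMPAux rest (i + 1) (some (i : Int))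
    else if c = ')' then (left, some (i : Int))
    else getMPAux rest (i + 1) left

def get_matching_parentheses (line : String) : Option Int × Option Int :=
  getMPAux line.toList 0 none

-- ===== PORT B =====
def get_matching_parentheses_alt (line : String) : Option Int × Option Int :=
  let right := PySem.Str.find line ")"
  if right = -1 then
    let left := PySem.Str.rfind line "("
    ((if left = -1 then none else some left), none)
  else
    let left := PySem.Str.rfindFrom line "(" 0 (some right)
    ((if left = -1 then none else some left), some right)

-- ===== PRECONDITION & SPEC =====
def Spec_get_matching_parentheses (line : String) (out : Option Int × Option Int) : Prop := out = get_matching_parentheses_alt line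
instance (line : String) (out : Option Int × Option Int) : Decidable (Spec_get_matching_parentheses line out) := by unfold Spec_get_matching_parentheses; infer_instance

-- ===== CLAIM (what is proved, stated in full; the proofs are below) =====
def Claim_equal_get_matching_parentheses : Prop := ∀ (line : String), Dom_get_matching_parentheses line → Spec_get_matching_parentheses line (get_matching_parentheses line)

-- ===== LEMMAS AND PROOFS =====

-- proof-only helpers: the last index of `c` in a list, and A's way of combining it with the accumulator
def pvLastIdx (c : Char) : List Char → Option Nat
  | [] => none
  | a :: t =>
    match pvLastIdx c t with
    | some k => some (k + 1)
    | none => if a = c then some 0 else none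

def pvComb (left : Option Int) (i : Nat) : Option Nat → Option Int
  | some k => some ((i + k : Nat) : Int)
  | none => left

lemma find_go_singleton (c : Char) (cs : List Char) (k : Nat) :
    PySem.Chars.find.go [c] cs k = if c ∈ cs then ((k + cs.idxOf c : Nat) : Int) else -1 := by
  induction cs generalizing k with
  | nil => simp [PySem.Chars.find.go]
  | cons a t ih =>
    by_cases h : c = a
    · subst h
      simp [PySem.Chars.find.go, List.isPrefixOf, List.idxOf_cons]
    · have h1 : (c == a) = false := beq_false_of_ne h
      have h2 : (a == c) = false := beq_false_of_ne (Ne.symm h)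
      simp only [PySem.Chars.find.go, List.isPrefixOf, h1, Bool.false_and, if_false,
        List.mem_cons, List.idxOf_cons, h2, cond_false, ih, Bool.false_eq_true]
      by_cases hm : c ∈ t
      · simp only [hm, if_true, or_true]
        congr 1
        omega
      · simp [hm, h]

lemma isPrefixOf_singleton (c : Char) (s : List Char) (j : Nat) :
    [c].isPrefixOf (s.drop j) = true ↔ s[j]? = some c := by
  have h0 : (s.drop j)[0]? = s[j]? := by
    rw [List.getElem?_drop]
    norm_num
  cases hd : s.drop j with
  | nil =>
    have hnone : s[j]? = none := by rw [← h0, hd]; rfl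
    simp [List.isPrefixOf, hd, hnone]
  | cons b t =>
    have hsj : s[j]? = some b := by rw [← h0, hd]; rfl
    by_cases hbc : b = c
    · subst hbc
      simp [List.isPrefixOf, hd, hsj]
    · have h1 : (c == b) = false := beq_false_of_ne (Ne.symm hbc)
      simp [List.isPrefixOf, hd, hsj, h1, hbc]

lemma pvLastIdx_append (c a : Char) (xs : List Char) :
    pvLastIdx c (xs ++ [a]) = if a = c then some xs.length else pvLastIdx c xs := by
  induction xs with
  | nil =>
    show pvLastIdx c [a] = _
    by_cases h : a = c <;> simp [pvLastIdx, h]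
  | cons b t ih =>
    by_cases h : a = c
    · simp only [List.cons_append, pvLastIdx, ih, if_pos h]
      simp
    · simp only [List.cons_append, pvLastIdx, ih, if_neg h]

lemma rfind_go_singleton (c : Char) (s : List Char) (j : Nat) :
    PySem.Chars.rfind.go s [c] j =
      match pvLastIdx c (s.take (j + 1)) with
      | some k => (k : Int)
      | none => -1 := by
  induction j with
  | zero =>
    cases s with
    | nil => simp [PySem.Chars.rfind.go, List.isPrefixOf, pvLastIdx]
    | cons b t =>
      by_cases hbc : b = c
      · subst hbc
        simp [PySem.Chars.rfind.go, List.isPrefixOf, pvLastIdx]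
      · have h1 : (c == b) = false := beq_false_of_ne (Ne.symm hbc)
        simp [PySem.Chars.rfind.go, List.isPrefixOf, pvLastIdx, h1, hbc]
  | succ j ih =>
    have ht : s.take (j + 1 + 1) = s.take (j + 1) ++ s[j+1]?.toList := List.take_add_one
    cases h0 : s[j+1]? with
    | none =>
      have hpre : ¬ [c].isPrefixOf (s.drop (j + 1)) = true := by
        rw [isPrefixOf_singleton]; simp [h0]
      rw [h0] at ht
      simp only [Option.toList_none, List.append_nil] at ht
      rw [show PySem.Chars.rfind.go s [c] (j + 1) =
          if [c].isPrefixOf (s.drop (j + 1)) = true then ((j + 1 : Nat) : Int)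
          else PySem.Chars.rfind.go s [c] j from rfl]
      rw [if_neg hpre, ih, ht]
    | some b =>
      have hlen : j + 1 < s.length := by
        by_contra hc
        have : s[j+1]? = none := by
          rw [List.getElem?_eq_none_iff]; omega
        rw [h0] at this; simp at this
      have htk : (s.take (j + 1)).length = j + 1 := by
        rw [List.length_take]; omega
      rw [h0] at ht
      simp only [Option.toList_some] at ht
      have hiff := isPrefixOf_singleton c s (j + 1)
      rw [h0] at hiff
      by_cases hbc : b = c
      · have hpre : [c].isPrefixOf (s.drop (j + 1)) = true := hiff.mpr (by rw [hbc])
        rw [show PySem.Chars.rfind.go s [c] (j + 1) =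
            if [c].isPrefixOf (s.drop (j + 1)) = true then ((j + 1 : Nat) : Int)
            else PySem.Chars.rfind.go s [c] j from rfl]
        rw [if_pos hpre, ht, pvLastIdx_append, if_pos hbc, htk]
      · have hpre : ¬ [c].isPrefixOf (s.drop (j + 1)) = true := by
          rw [hiff]; simp [hbc]
        rw [show PySem.Chars.rfind.go s [c] (j + 1) =
            if [c].isPrefixOf (s.drop (j + 1)) = true then ((j + 1 : Nat) : Int)
            else PySem.Chars.rfind.go s [c] j from rfl]
        rw [if_neg hpre, ih, ht, pvLastIdx_append, if_neg hbc]

lemma rfind_singleton (c : Char) (s : List Char) :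
    PySem.Chars.rfind s [c] =
      match pvLastIdx c s with
      | some k => (k : Int)
      | none => -1 := by
  simp only [PySem.Chars.rfind]
  rw [rfind_go_singleton, List.take_of_length_le (by omega)]

lemma rfindFrom_zero_eval (s sub : List Char) (r : Nat) (hr : r ≤ s.length) :
    PySem.Chars.rfindFrom s sub 0 (some (r : Int)) = PySem.Chars.rfind (s.take r) sub := by
  simp only [PySem.Chars.rfindFrom]
  have h1 : ¬ ((s.length : Int) < (r : Int)) := by
    simp only [not_lt]; exact_mod_cast hr
  have h2 : ¬ ((r : Int) < 0) := by simp
  rw [if_neg h1, if_neg h2]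
  norm_num
  split <;> simp_all

lemma getMPAux_spec (cs : List Char) (i : Nat) (left : Option Int) :
    getMPAux cs i left =
      if ')' ∈ cs then
        (pvComb left i (pvLastIdx '(' (cs.take (cs.idxOf ')'))),
          some ((i + cs.idxOf ')' : Nat) : Int))
      else (pvComb left i (pvLastIdx '(' cs), none) := by
  induction cs generalizing i left with
  | nil => simp [getMPAux, pvLastIdx, pvComb]
  | cons c t ih =>
    by_cases hc1 : c = '('
    · subst hc1
      rw [show getMPAux ('(' :: t) i left = getMPAux t (i + 1) (some (i : Int)) from by
        simp [getMPAux]]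
      rw [ih]
      have hidx : (('(' :: t).idxOf ')') = t.idxOf ')' + 1 := by
        simp [List.idxOf_cons]
      by_cases hm : ')' ∈ t
      · have hm2 : (')' ∈ '(' :: t) := List.mem_cons_of_mem _ hm
        rw [if_pos hm, if_pos hm2, hidx, List.take_succ_cons]
        simp only [Prod.mk.injEq]
        refine ⟨?_, by congr 1; omega⟩
        cases h : pvLastIdx '(' (t.take (t.idxOf ')')) with
        | none => simp [pvLastIdx, h, pvComb]
        | some k =>
          simp only [pvLastIdx, h, pvComb]
          congr 1
          omega
      · have hm2 : ¬ (')' ∈ '(' :: t) := by simp [hm]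
        rw [if_neg hm, if_neg hm2]
        simp only [Prod.mk.injEq, and_true]
        cases h : pvLastIdx '(' t with
        | none => simp [pvLastIdx, h, pvComb]
        | some k =>
          simp only [pvLastIdx, h, pvComb]
          congr 1
          omega
    · by_cases hc2 : c = ')'
      · subst hc2
        rw [show getMPAux (')' :: t) i left = (left, some (i : Int)) from by
          simp [getMPAux]]
        have hm2 : (')' ∈ ')' :: t) := List.mem_cons_self ..
        rw [if_pos hm2]
        have hidx : ((')' :: t).idxOf ')') = 0 := by simp [List.idxOf_cons]
        rw [hidx, List.take_zero]
        simp [pvLastIdx, pvComb]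
      · rw [show getMPAux (c :: t) i left = getMPAux t (i + 1) left from by
          simp [getMPAux, hc1, hc2]]
        rw [ih]
        have hidx : ((c :: t).idxOf ')') = t.idxOf ')' + 1 := by
          simp [List.idxOf_cons, hc2]
        by_cases hm : ')' ∈ t
        · have hm2 : (')' ∈ c :: t) := List.mem_cons_of_mem _ hm
          rw [if_pos hm, if_pos hm2, hidx, List.take_succ_cons]
          simp only [Prod.mk.injEq]
          refine ⟨?_, by congr 1; omega⟩
          cases h : pvLastIdx '(' (t.take (t.idxOf ')')) with
          | none => simp [pvLastIdx, h, pvComb, hc1]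
          | some k =>
            simp only [pvLastIdx, h, pvComb]
            congr 1
            omega
        · have hm2 : ¬ (')' ∈ c :: t) := by simp [hm, eq_comm, hc2]
          rw [if_neg hm, if_neg hm2]
          simp only [Prod.mk.injEq, and_true]
          cases h : pvLastIdx '(' t with
          | none => simp [pvLastIdx, h, pvComb, hc1]
          | some k =>
            simp only [pvLastIdx, h, pvComb]
            congr 1
            omega

-- ===== VERDICT (by name: the statement is the Claim_ definition above) =====
theorem get_matching_parentheses_spec : Claim_equal_get_matching_parentheses := by
  intro line _
  show get_matching_parentheses line = get_matching_parentheses_alt line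
  unfold get_matching_parentheses get_matching_parentheses_alt
  rw [getMPAux_spec]
  have hfind : PySem.Str.find line ")" =
      if ')' ∈ line.toList then ((line.toList.idxOf ')' : Nat) : Int) else -1 := by
    show PySem.Chars.find.go [')'] line.toList 0 = _
    rw [find_go_singleton]
    simp
  by_cases hm : ')' ∈ line.toList
  · have hle : line.toList.idxOf ')' ≤ line.toList.length := List.idxOf_le_length
    rw [if_pos hm]
    simp only [hfind, hm, if_true]
    rw [if_neg (by omega : ¬ ((line.toList.idxOf ')' : Nat) : Int) = -1)]
    have hrf : PySem.Str.rfindFrom line "(" 0 (some ((line.toList.idxOf ')' : Nat) : Int)) =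
        PySem.Chars.rfind (line.toList.take (line.toList.idxOf ')')) ['('] := by
      show PySem.Chars.rfindFrom line.toList ['('] 0 _ = _
      rw [rfindFrom_zero_eval _ _ _ hle]
    rw [hrf, rfind_singleton]
    cases h : pvLastIdx '(' (line.toList.take (line.toList.idxOf ')')) with
    | none => simp [pvComb]
    | some k =>
      have hk : ¬ ((k : Nat) : Int) = -1 := by omega
      simp [pvComb, hk]
  · rw [if_neg hm]
    simp only [hfind, hm, if_false]
    rw [if_pos trivial]
    have hrw : PySem.Str.rfind line "(" =
        match pvLastIdx '(' line.toList with
        | some k => ((k : Nat) : Int)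
        | none => (-1 : Int) := by
      show PySem.Chars.rfind line.toList ['('] = _
      rw [rfind_singleton]
    rw [hrw]
    cases h : pvLastIdx '(' line.toList with
    | none => simp [pvComb]
    | some k =>
      have hk : ¬ ((k : Nat) : Int) = -1 := by omega
      simp [pvComb, hk]
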